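-- pv_equiv track=rewrite | github.com/rumtang/Futurist | src/api/analysis_endpoints.py | determine_agents_for_topic
-- ===== SOURCE A (Python) =====
-- from typing import Optional, List
--
-- def determine_agents_for_topic(topic: str) -> List[str]:
--     """Determine which agents to use based on the topic."""
--     topic_lower = topic.lower()
--
--     # Always include these core agents
--     agents = ["ai_futurist", "trend_scanner"]
--
--     # Add specific agents based on topic
--     if any(word in topic_lower for word in ["customer", "cx", "experience", "service"]):
--         agents.append("customer_insight")
--
--     if any(word in topic_lower for word in ["tech", "technology", "digital", "software"]):
--         agents.append("tech_impact")
--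
--     if any(word in topic_lower for word in ["business", "organization", "company", "enterprise"]):
--         agents.append("org_transformation")
--
--     # Always include synthesis at the end
--     if "synthesis" not in agents:
--         agents.append("synthesis")
--
--     return agents
-- ===== SOURCE B (Python) =====
-- from typing import List
--
-- # keyword -> agent, flattened; scanned by position in the topic
-- _KEYWORD_AGENTS = [
--     ("customer", "customer_insight"), ("cx", "customer_insight"),
--     ("experience", "customer_insight"), ("service", "customer_insight"),
--     ("tech", "tech_impact"), ("technology", "tech_impact"),
--     ("digital", "tech_impact"), ("software", "tech_impact"),
--     ("business", "org_transformation"), ("organization", "org_transformation"),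
--     ("company", "org_transformation"), ("enterprise", "org_transformation"),
-- ]
--
-- def determine_agents_for_topic(topic: str) -> List[str]:
--     """Determine which agents to use based on the topic."""
--     t = topic.lower()
--     # single left-to-right scan: at each position, mark agents whose keyword starts here
--     found = set()
--     for i in range(len(t)):
--         for kw, agent in _KEYWORD_AGENTS:
--             if agent not in found and t.startswith(kw, i):
--                 found.add(agent)
--     agents = ["ai_futurist", "trend_scanner"]
--     for agent in ("customer_insight", "tech_impact", "org_transformation"):
--         if agent in found:
--             agents.append(agent)
--     agents.append("synthesis")
--     return agents
-- ===== Notes on version B (the rewrite author's own statement) =====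
-- stated objective: alternative
-- what changed: Instead of running a separate substring search per keyword group, B lowercases the topic once and makes a single left-to-right scan over its positions, marking in a set each agent whose keyword occurs as a prefix at the current position, then emits core agents, matched agents in fixed order, and synthesis unconditionally.
import Mathlib
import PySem

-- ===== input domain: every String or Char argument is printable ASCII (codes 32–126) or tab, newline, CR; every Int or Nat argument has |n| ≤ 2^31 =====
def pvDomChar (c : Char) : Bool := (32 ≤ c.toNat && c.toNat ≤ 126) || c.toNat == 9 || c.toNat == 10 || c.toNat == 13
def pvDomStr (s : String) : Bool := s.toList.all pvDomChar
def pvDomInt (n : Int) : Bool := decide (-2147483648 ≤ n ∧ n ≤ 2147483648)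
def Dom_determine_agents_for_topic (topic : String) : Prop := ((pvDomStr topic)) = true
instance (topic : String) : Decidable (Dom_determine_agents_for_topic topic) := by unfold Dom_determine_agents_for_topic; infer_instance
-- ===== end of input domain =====

-- B replaces A's per-keyword substring searches by a single left-to-right positional scan of the
-- lowered topic, collecting matched agents into a set and then emitting them in fixed order; alternative algorithm (no speed claim).


-- ===== PORT A =====
def determine_agents_for_topic (topic : String) : List String :=
  let topic_lower := PySem.Str.lower topic
  let agents := ["ai_futurist", "trend_scanner"]
  let agents := if ["customer", "cx", "experience", "service"].any
      (fun word => PySem.Str.isIn word topic_lower) then agents ++ ["customer_insight"] else agents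
  let agents := if ["tech", "technology", "digital", "software"].any
      (fun word => PySem.Str.isIn word topic_lower) then agents ++ ["tech_impact"] else agents
  let agents := if ["business", "organization", "company", "enterprise"].any
      (fun word => PySem.Str.isIn word topic_lower) then agents ++ ["org_transformation"] else agents
  let agents := if ¬ ("synthesis" ∈ agents) then agents ++ ["synthesis"] else agents
  agents

-- ===== PORT B =====
def pvKeywordAgents : List (String × String) :=
  [("customer", "customer_insight"), ("cx", "customer_insight"),
   ("experience", "customer_insight"), ("service", "customer_insight"),
   ("tech", "tech_impact"), ("technology", "tech_impact"),
   ("digital", "tech_impact"), ("software", "tech_impact"),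
   ("business", "org_transformation"), ("organization", "org_transformation"),
   ("company", "org_transformation"), ("enterprise", "org_transformation")]

-- one scan position: mark each agent whose keyword starts at the head of s
def pvMarkHere (s : List Char) (found : PySem.Set String) : PySem.Set String :=
  pvKeywordAgents.foldl
    (fun f p => if ¬ PySem.Set.contains f p.2 ∧ PySem.Chars.startswith s p.1.toList
                then PySem.Set.add f p.2 else f) found

-- the scan over all positions i of t (for i in range(len(t)): ... t.startswith(kw, i) ...)
def pvScan : List Char → PySem.Set String → PySem.Set String
  | [], found => found
  | c :: rest, found => pvScan rest (pvMarkHere (c :: rest) found)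

def determine_agents_for_topic_alt (topic : String) : List String :=
  let t := PySem.Str.lower topic
  let found := pvScan t.toList PySem.Set.empty
  let agents := ["customer_insight", "tech_impact", "org_transformation"].foldl
    (fun acc a => if PySem.Set.contains found a then acc ++ [a] else acc)
    ["ai_futurist", "trend_scanner"]
  agents ++ ["synthesis"]

-- ===== PRECONDITION & SPEC =====
def Spec_determine_agents_for_topic (topic : String) (out : List String) : Prop := out = determine_agents_for_topic_alt topic
instance (topic : String) (out : List String) : Decidable (Spec_determine_agents_for_topic topic out) := by unfold Spec_determine_agents_for_topic; infer_instance

-- ===== CLAIM (what is proved, stated in full; the proofs are below) =====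
def Claim_equal_determine_agents_for_topic : Prop := ∀ (topic : String), Dom_determine_agents_for_topic topic → Spec_determine_agents_for_topic topic (determine_agents_for_topic topic)

-- ===== LEMMAS AND PROOFS =====

-- one fold step of pvMarkHere, membership characterised
theorem step_mem (s : List Char) (x : String) (f : PySem.Set String) (p : String × String) :
    x ∈ (if ¬ PySem.Set.contains f p.2 ∧ PySem.Chars.startswith s p.1.toList = true
         then PySem.Set.add f p.2 else f)
      ↔ x ∈ f ∨ (p.2 = x ∧ PySem.Chars.startswith s p.1.toList = true) := by
  split_ifs with h
  · rw [PySem.Set.mem_add]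
    constructor
    · rintro (h' | rfl)
      · exact Or.inl h'
      · exact Or.inr ⟨rfl, h.2⟩
    · rintro (h' | ⟨rfl, _⟩)
      · exact Or.inl h'
      · exact Or.inr rfl
  · rw [not_and] at h
    constructor
    · exact Or.inl
    · rintro (h' | ⟨rfl, hs⟩)
      · exact h'
      · by_cases hc : PySem.Set.contains f p.2 = true
        · exact (PySem.Set.contains_iff f p.2).mp hc
        · exact absurd hs (h hc)

-- membership after one position's marking step
theorem mem_markHere (s : List Char) (f : PySem.Set String) (x : String) :
    x ∈ pvMarkHere s f ↔ x ∈ f ∨ ∃ p ∈ pvKeywordAgents, p.2 = x ∧ PySem.Chars.startswith s p.1.toList = true := by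
  unfold pvMarkHere
  generalize pvKeywordAgents = l
  induction l generalizing f with
  | nil => simp
  | cons p rest ih =>
    rw [List.foldl_cons, ih, step_mem, List.exists_mem_cons_iff]
    tauto

-- membership after the whole scan
theorem mem_scan (s : List Char) (f : PySem.Set String) (x : String) :
    x ∈ pvScan s f ↔ x ∈ f ∨ ∃ p ∈ pvKeywordAgents, p.2 = x ∧ ∃ j, p.1.toList <+: s.drop j := by
  induction s generalizing f with
  | nil =>
    simp only [pvScan, List.drop_nil]
    constructor
    · exact Or.inl
    · rintro (h | ⟨p, hp, _, _, hpre⟩)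
      · exact h
      · exfalso
        have : p.1.toList ≠ [] := by
          fin_cases hp <;> simp
        exact this (List.prefix_nil.mp hpre)
  | cons c rest ih =>
    simp only [pvScan, ih, mem_markHere]
    constructor
    · rintro ((h | ⟨p, hp, hx, hs⟩) | ⟨p, hp, hx, j, hj⟩)
      · exact Or.inl h
      · exact Or.inr ⟨p, hp, hx, 0, by simpa [PySem.Chars.startswith_iff] using hs⟩
      · exact Or.inr ⟨p, hp, hx, j + 1, by simpa using hj⟩
    · rintro (h | ⟨p, hp, hx, j, hj⟩)
      · exact Or.inl (Or.inl h)
      · cases j with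
        | zero => exact Or.inl (Or.inr ⟨p, hp, hx, by simpa [PySem.Chars.startswith_iff] using hj⟩)
        | succ j => exact Or.inr ⟨p, hp, hx, j, by simpa using hj⟩

-- contains in the scan result, per agent, equals A's any-substring test
theorem scan_ci (t : String) :
    PySem.Set.contains (pvScan t.toList PySem.Set.empty) "customer_insight"
      = ["customer", "cx", "experience", "service"].any (fun word => PySem.Str.isIn word t) := by
  rw [Bool.eq_iff_iff]
  simp only [PySem.Set.contains_iff, mem_scan, List.any_eq_true, pvKeywordAgents,
    List.exists_mem_cons_iff, List.not_mem_nil, PySem.Chars.exists_prefix_drop_iff_isIn,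
    PySem.Str.isIn_eq, PySem.Set.empty]
  simp

theorem scan_ti (t : String) :
    PySem.Set.contains (pvScan t.toList PySem.Set.empty) "tech_impact"
      = ["tech", "technology", "digital", "software"].any (fun word => PySem.Str.isIn word t) := by
  rw [Bool.eq_iff_iff]
  simp only [PySem.Set.contains_iff, mem_scan, List.any_eq_true, pvKeywordAgents,
    List.exists_mem_cons_iff, List.not_mem_nil, PySem.Chars.exists_prefix_drop_iff_isIn,
    PySem.Str.isIn_eq, PySem.Set.empty]
  simp

theorem scan_ot (t : String) :
    PySem.Set.contains (pvScan t.toList PySem.Set.empty) "org_transformation"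
      = ["business", "organization", "company", "enterprise"].any (fun word => PySem.Str.isIn word t) := by
  rw [Bool.eq_iff_iff]
  simp only [PySem.Set.contains_iff, mem_scan, List.any_eq_true, pvKeywordAgents,
    List.exists_mem_cons_iff, List.not_mem_nil, PySem.Chars.exists_prefix_drop_iff_isIn,
    PySem.Str.isIn_eq, PySem.Set.empty]
  simp

-- ===== VERDICT (by name: the statement is the Claim_ definition above) =====
theorem determine_agents_for_topic_spec : Claim_equal_determine_agents_for_topic := by
  intro topic _
  unfold Spec_determine_agents_for_topic determine_agents_for_topic determine_agents_for_topic_alt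
  simp only [List.foldl_cons, List.foldl_nil, scan_ci, scan_ti, scan_ot]
  split_ifs <;> simp_all
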